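-- pv_equiv track=rewrite | github.com/jayjohn18000/storyboard | services/shared/policy/middleware.py | _path_matches_pattern
-- ===== SOURCE A (Python) =====
-- def _path_matches_pattern(path: str, pattern: str) -> bool:
--     """Check if path matches endpoint pattern."""
--     # Simple pattern matching - replace {id} with wildcard
--     pattern_parts = pattern.replace("{id}", "*").split("/")
--     path_parts = path.split("/")
--
--     if len(pattern_parts) != len(path_parts):
--         return False
--
--     for pattern_part, path_part in zip(pattern_parts, path_parts):
--         if pattern_part != "*" and pattern_part != path_part:
--             return False
--
--     return True
-- ===== SOURCE B (Python) =====
-- def _path_matches_pattern(path: str, pattern: str) -> bool: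
--     """Check if path matches endpoint pattern (single char-level scan, no splitting)."""
--     p = pattern.replace("{id}", "*")
--     s = path
--     i = j = 0
--     at_start = True  # positioned at the start of a segment in p
--     while True:
--         if at_start and i < len(p) and p[i] == "*" and (i + 1 == len(p) or p[i + 1] == "/"):
--             # whole-'*' pattern segment: skip the current path segment
--             i += 1
--             while j < len(s) and s[j] != "/":
--                 j += 1
--             at_start = False
--             continue
--         if i == len(p) or j == len(s):
--             return i == len(p) and j == len(s)
--         if p[i] != s[j]:
--             return False
--         at_start = p[i] == "/"
--         i += 1
--         j += 1
-- ===== Notes on version B (the rewrite author's own statement) =====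
-- stated objective: alternative
-- what changed: A splits pattern and path into segment lists, compares lengths, then zips; B never splits: it does a single char-level two-pointer scan of both strings, skipping a path segment in place when the pattern has a whole-'*' segment.
import Mathlib
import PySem

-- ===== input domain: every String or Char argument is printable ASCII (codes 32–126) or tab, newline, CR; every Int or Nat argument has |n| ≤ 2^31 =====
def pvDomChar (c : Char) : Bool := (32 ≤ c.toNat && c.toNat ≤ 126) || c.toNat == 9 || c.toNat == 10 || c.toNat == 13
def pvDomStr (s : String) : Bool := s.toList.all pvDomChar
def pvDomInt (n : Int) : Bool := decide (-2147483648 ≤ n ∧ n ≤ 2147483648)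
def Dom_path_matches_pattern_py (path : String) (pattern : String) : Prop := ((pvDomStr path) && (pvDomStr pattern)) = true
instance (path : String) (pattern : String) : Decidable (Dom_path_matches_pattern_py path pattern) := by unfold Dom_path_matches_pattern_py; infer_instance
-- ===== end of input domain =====

-- B replaces A's split-into-segments + length check + zip loop by a single char-level
-- two-pointer scan of path and pattern (objective: alternative, same O(n) cost).

-- ===== PORT A =====
-- pattern.replace("{id}", "*").split("/") ; path.split("/") ; length check ; zip loop
def path_matches_pattern_py (path : String) (pattern : String) : Bool :=
  let pattern_parts := PySem.Chars.splitOn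
      (PySem.Chars.replace pattern.toList "{id}".toList "*".toList) "/".toList
  let path_parts := PySem.Chars.splitOn path.toList "/".toList
  if pattern_parts.length ≠ path_parts.length then false
  else
    -- the for-loop with early `return False`:
    (pattern_parts.zip path_parts).all
      (fun pq => !(pq.1 ≠ "*".toList ∧ pq.1 ≠ pq.2))

-- ===== PORT B =====
-- the while loop of Source B: indices i/j become the suffix lists p/s;
-- `at_start` is the Bool flag; the inner skip-loop is dropWhile (· ≠ '/')
def bMatch : Bool → List Char → List Char → Bool
  | atStart, p, s =>
    if _h : atStart = true ∧ p.head? = some '*' ∧ (p.tail = [] ∨ p.tail.head? = some '/') then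
      bMatch false p.tail (s.dropWhile (· ≠ '/'))
    else
      match p, s with
      | [], [] => true
      | [], _ :: _ => false
      | _ :: _, [] => false
      | c :: p', d :: s' => c == d && bMatch (c == '/') p' s'
  termination_by _ p _ => p.length
  decreasing_by
    · rcases p with _ | ⟨c, p'⟩
      · simp at _h
      · simp
    · simp

def path_matches_pattern_py_alt (path : String) (pattern : String) : Bool :=
  bMatch true (PySem.Chars.replace pattern.toList "{id}".toList "*".toList) path.toList

-- ===== PRECONDITION & SPEC =====
def Spec_path_matches_pattern_py (path : String) (pattern : String) (out : Bool) : Prop := out = path_matches_pattern_py_alt path pattern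
instance (path : String) (pattern : String) (out : Bool) : Decidable (Spec_path_matches_pattern_py path pattern out) := by unfold Spec_path_matches_pattern_py; infer_instance

-- ===== CLAIM (what is proved, stated in full; the proofs are below) =====
def Claim_equal_path_matches_pattern_py : Prop := ∀ (path : String) (pattern : String), Dom_path_matches_pattern_py path pattern → Spec_path_matches_pattern_py path pattern (path_matches_pattern_py path pattern)

-- ===== LEMMAS AND PROOFS =====

-- structural description of splitting on the single character '/'
def consHead (a : List Char) : List (List Char) → List (List Char)
  | [] => [a]
  | h :: t => (a ++ h) :: t

def segSplit : List Char → List (List Char)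
  | [] => [[]]
  | c :: rest => if c = '/' then [] :: segSplit rest else consHead [c] (segSplit rest)

lemma segSplit_ne_nil (s : List Char) : segSplit s ≠ [] := by
  cases s with
  | nil => simp [segSplit]
  | cons c rest =>
    simp only [segSplit]
    split
    · simp
    · cases h : segSplit rest <;> simp [consHead]

lemma splitOn_go_eq (fuel : Nat) (l cur : List Char) (acc : List (List Char))
    (hf : l.length < fuel) :
    PySem.Chars.splitOn.go ['/'] fuel l cur acc
      = acc.reverse ++ consHead cur.reverse (segSplit l) := by
  induction fuel generalizing l cur acc with
  | zero => omega
  | succ fuel ih =>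
    cases l with
    | nil =>
      simp [PySem.Chars.splitOn.go, segSplit, consHead]
    | cons c rest =>
      simp only [PySem.Chars.splitOn.go]
      by_cases hc : c = '/'
      · subst hc
        have hpre : List.isPrefixOf ['/'] ('/' :: rest) = true := by
          simp [List.isPrefixOf]
        simp only [hpre, if_pos]
        rw [ih]
        · rcases h : segSplit rest with _ | ⟨sh, st⟩
          · exact absurd h (segSplit_ne_nil rest)
          · simp [segSplit, h, consHead]
        · simpa using Nat.lt_of_succ_lt_succ (by simpa using hf)
      · have hpre : List.isPrefixOf ['/'] (c :: rest) = false := by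
          simp only [List.isPrefixOf, Bool.and_eq_false_iff, beq_eq_false_iff_ne, ne_eq]
          left; exact fun h => hc h.symm
        simp only [hpre, Bool.false_eq_true, if_false]
        rw [ih]
        · rcases h : segSplit rest with _ | ⟨sh, st⟩
          · exact absurd h (segSplit_ne_nil rest)
          · simp [segSplit, hc, h, consHead]
        · simpa using Nat.lt_of_succ_lt_succ (by simpa using hf)

lemma consHead_nil (t : List (List Char)) (h : t ≠ []) : consHead [] t = t := by
  cases t with
  | nil => exact absurd rfl h
  | cons a as => simp [consHead]

lemma splitOn_eq_segSplit (s : List Char) :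
    PySem.Chars.splitOn s ['/'] = segSplit s := by
  have := splitOn_go_eq (s.length + 1) s [] [] (by omega)
  simpa [PySem.Chars.splitOn, consHead_nil _ (segSplit_ne_nil s)] using this

-- the recursive segment matcher both sides reduce to
def segMatch : List (List Char) → List (List Char) → Bool
  | [], [] => true
  | [], _ :: _ => false
  | _ :: _, [] => false
  | a :: as, b :: bs => (a == ['*'] || a == b) && segMatch as bs

lemma segMatch_nil_right (ps : List (List Char)) :
    segMatch ps [] = (ps == []) := by
  cases ps <;> simp [segMatch]

-- A's length-check + zip-all equals segMatch
lemma lenZipAll_eq_segMatch (ps qs : List (List Char)) :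
    (if ps.length ≠ qs.length then false
     else (ps.zip qs).all (fun pq => !(pq.1 ≠ "*".toList ∧ pq.1 ≠ pq.2)))
      = segMatch ps qs := by
  induction ps generalizing qs with
  | nil => cases qs <;> simp [segMatch]
  | cons a as ih =>
    cases qs with
    | nil => simp [segMatch]
    | cons b bs =>
      simp only [segMatch]
      rw [← ih bs]
      by_cases hl : as.length = bs.length
      · simp only [List.length_cons, hl, ne_eq, not_true_eq_false, if_neg, not_false_iff,
          List.zip_cons_cons, List.all_cons]
        have : ("*".toList = ['*']) := by decide
        by_cases ha : a = ['*'] <;> by_cases hb : a = b <;>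
          simp [ha, hb, this, Bool.and_comm]
      · have h1 : (a :: as).length ≠ (b :: bs).length := by simp [hl]
        simp only [h1, ne_eq, not_false_iff, if_pos, hl]
        by_cases hab : a == ['*'] || a == b <;> simp [hab]

-- B's char scan equals segMatch / literal-head variant of it
def eqSegMatch : List (List Char) → List (List Char) → Bool
  | [], [] => true
  | [], _ :: _ => false
  | _ :: _, [] => false
  | a :: as, b :: bs => (a == b) && segMatch as bs

def dropSeg : List (List Char) → List (List Char)
  | [] => [[]]
  | _ :: t => [] :: t

lemma segSplit_dropWhile (s : List Char) :
    segSplit (s.dropWhile (· ≠ '/')) = dropSeg (segSplit s) := by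
  induction s with
  | nil => simp [segSplit, dropSeg]
  | cons c rest ih =>
    by_cases hc : c = '/'
    · subst hc
      simp [List.dropWhile, segSplit, dropSeg]
    · have hstep : (c :: rest).dropWhile (· ≠ '/') = rest.dropWhile (· ≠ '/') := by
        simp [List.dropWhile, hc]
      rw [hstep, ih]
      rcases h : segSplit rest with _ | ⟨sh, st⟩
      · exact absurd h (segSplit_ne_nil rest)
      · simp [segSplit, hc, h, consHead, dropSeg]

-- unfolding equations for bMatch
lemma bMatch_nil (a : Bool) (s : List Char) : bMatch a [] s = (s == []) := by
  rw [bMatch]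
  cases s <;> simp

lemma bMatch_wild (p' s : List Char) (h : p' = [] ∨ p'.head? = some '/') :
    bMatch true ('*' :: p') s = bMatch false p' (s.dropWhile (· ≠ '/')) := by
  rw [bMatch]
  simp [h]

lemma bMatch_cons_nil_false (c : Char) (p' : List Char) :
    bMatch false (c :: p') [] = false := by
  rw [bMatch]
  simp

lemma bMatch_cons_cons_false (c : Char) (p' : List Char) (d : Char) (s' : List Char) :
    bMatch false (c :: p') (d :: s') = (c == d && bMatch (c == '/') p' s') := by
  rw [bMatch]
  simp

lemma bMatch_true_of_not_wild (c : Char) (p' s : List Char)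
    (h : ¬(c = '*' ∧ (p' = [] ∨ p'.head? = some '/'))) :
    bMatch true (c :: p') s = bMatch false (c :: p') s := by
  cases s with
  | nil =>
    rw [bMatch]
    simp [h, bMatch_cons_nil_false]
  | cons d s' =>
    rw [bMatch]
    simp [h, bMatch_cons_cons_false]

lemma segMatch_single_nil (s : List Char) :
    segMatch [([] : List Char)] (segSplit s) = (s == []) := by
  cases s with
  | nil => simp [segSplit, segMatch]
  | cons d s' =>
    rcases h : segSplit s' with _ | ⟨sh, st⟩
    · exact absurd h (segSplit_ne_nil s')
    · by_cases hd : d = '/' <;>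
        simp [segSplit, hd, h, consHead, segMatch]

lemma eqSegMatch_single_nil (s : List Char) :
    eqSegMatch [([] : List Char)] (segSplit s) = (s == []) := by
  cases s with
  | nil => simp [segSplit, eqSegMatch, segMatch]
  | cons d s' =>
    rcases h : segSplit s' with _ | ⟨sh, st⟩
    · exact absurd h (segSplit_ne_nil s')
    · by_cases hd : d = '/' <;>
        simp [segSplit, hd, h, consHead, eqSegMatch, segMatch]

-- the central invariant: B's scanner computes the segment matchers on the splits
lemma bMatch_eq (n : Nat) : ∀ (p s : List Char), p.length ≤ n →
    (bMatch true p s = segMatch (segSplit p) (segSplit s)) ∧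
    (bMatch false p s = eqSegMatch (segSplit p) (segSplit s)) := by
  induction n with
  | zero =>
    intro p s hp
    have hpnil : p = [] := List.length_eq_zero_iff.mp (Nat.le_zero.mp hp)
    subst hpnil
    simp [bMatch_nil, segSplit, segMatch_single_nil, eqSegMatch_single_nil]
  | succ n ih =>
    intro p s hp
    cases p with
    | nil => simp [bMatch_nil, segSplit, segMatch_single_nil, eqSegMatch_single_nil]
    | cons c p' =>
      have hp' : p'.length ≤ n := by simpa using hp
      -- Goal B first (atStart = false)
      have goalB : bMatch false (c :: p') s = eqSegMatch (segSplit (c :: p')) (segSplit s) := by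
        cases s with
        | nil =>
          rw [bMatch_cons_nil_false]
          rcases h : segSplit p' with _ | ⟨th, tt⟩
          · exact absurd h (segSplit_ne_nil p')
          · by_cases hc : c = '/' <;>
              simp [segSplit, hc, h, consHead, eqSegMatch, segMatch_nil_right]
        | cons d s' =>
          rw [bMatch_cons_cons_false]
          rcases ht : segSplit p' with _ | ⟨th, tt⟩
          · exact absurd ht (segSplit_ne_nil p')
          rcases hb : segSplit s' with _ | ⟨bh, bt⟩
          · exact absurd hb (segSplit_ne_nil s')
          by_cases hc : c = '/' <;> by_cases hd : d = '/'
          · -- c = d = '/'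
            subst hc; subst hd
            have := (ih p' s' hp').1
            simp [segSplit, ht, hb, eqSegMatch, this]
          · subst hc
            simp [segSplit, hb, hd, consHead, eqSegMatch, Ne.symm hd]
          · subst hd
            simp [segSplit, ht, hc, consHead, eqSegMatch]
          · -- both literal chars
            have hrec := (ih p' s' hp').2
            have hcf : (c == '/') = false := by simp [hc]
            by_cases hcd : c = d
            · subst hcd
              rw [hcf] at *
              simp [segSplit, ht, hb, hc, consHead, eqSegMatch, hrec]
            · have hcdf : (c == d) = false := by simp [hcd]
              simp [segSplit, ht, hb, hc, hd, consHead, eqSegMatch, hcdf]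
      refine ⟨?_, goalB⟩
      by_cases hw : c = '*' ∧ (p' = [] ∨ p'.head? = some '/')
      · -- wildcard segment
        obtain ⟨hc, hrest⟩ := hw
        subst hc
        rw [bMatch_wild p' s hrest]
        have hB := (ih p' (s.dropWhile (· ≠ '/')) hp').2
        rw [hB, segSplit_dropWhile]
        rcases hb : segSplit s with _ | ⟨bh, bt⟩
        · exact absurd hb (segSplit_ne_nil s)
        rcases hrest with hnil | hslash
        · subst hnil
          simp [segSplit, consHead, dropSeg, segMatch, eqSegMatch]
        · rcases p' with _ | ⟨c2, p''⟩
          · simp at hslash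
          · have hc2 : c2 = '/' := by simpa using hslash
            subst hc2
            rcases ht : segSplit p'' with _ | ⟨th, tt⟩
            · exact absurd ht (segSplit_ne_nil p'')
            simp [segSplit, ht, consHead, dropSeg, segMatch, eqSegMatch]
      · -- not a wildcard segment: head segment of the pattern is not ["*"]
        rw [bMatch_true_of_not_wild c p' s hw, goalB]
        rcases ht : segSplit p' with _ | ⟨th, tt⟩
        · exact absurd ht (segSplit_ne_nil p')
        rcases hb : segSplit s with _ | ⟨bh, bt⟩
        · exact absurd hb (segSplit_ne_nil s)
        by_cases hc : c = '/'
        · subst hc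
          simp [segSplit, ht, segMatch, eqSegMatch]
        · -- head segment is c :: th with (c, th head) not "*"-alone
          have hhead : ¬(c :: th = ['*']) := by
            intro hEq
            have hc' : c = '*' := by injection hEq with h1 _
            have hth : th = [] := by injection hEq
            apply hw
            refine ⟨hc', ?_⟩
            cases p' with
            | nil => exact Or.inl rfl
            | cons e p'' =>
              by_cases he : e = '/'
              · exact Or.inr (by simp [he])
              · exfalso
                rcases h2 : segSplit p'' with _ | ⟨xh, xt⟩
                · exact absurd h2 (segSplit_ne_nil p'')
                · rw [segSplit, if_neg he, h2] at ht
                  simp [consHead] at ht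
                  rw [hth] at ht
                  exact List.cons_ne_nil e xh ht.1
          have hstar : (c == '*' && th.isEmpty) = false := by
            by_cases h1 : c = '*' <;> by_cases h2 : th = [] <;>
              simp [h1, h2] at hhead ⊢
          simp only [segSplit, if_neg hc, ht, consHead, segMatch, eqSegMatch]
          simp [hstar]

theorem ports_agree (path pattern : String) :
    path_matches_pattern_py path pattern = path_matches_pattern_py_alt path pattern := by
  unfold path_matches_pattern_py path_matches_pattern_py_alt
  have hsep : ("/".toList) = ['/'] := by decide
  rw [hsep, splitOn_eq_segSplit, splitOn_eq_segSplit]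
  rw [lenZipAll_eq_segMatch]
  exact ((bMatch_eq _ _ path.toList le_rfl).1).symm

-- ===== VERDICT (by name: the statement is the Claim_ definition above) =====
theorem path_matches_pattern_py_spec : Claim_equal_path_matches_pattern_py := by
  intro path pattern _
  unfold Spec_path_matches_pattern_py
  exact ports_agree path pattern
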